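-- pv_equiv track=rewrite | github.com/houx15/ai-bib-analysis | 06_compare_dblp_openalex.py | extract_doi_key
-- ===== SOURCE A (Python) =====
-- def extract_doi_key(doi_str: str) -> str:
--     """Extract bare DOI (e.g. '10.1234/foo') from a URL or raw DOI string."""
--     if not doi_str:
--         return ''
--     doi_str = doi_str.strip()
--     for prefix in ['https://doi.org/', 'http://doi.org/',
--                     'http://dx.doi.org/', 'https://dx.doi.org/']:
--         if doi_str.lower().startswith(prefix):
--             return doi_str[len(prefix):].lower()
--     if doi_str.startswith('10.'):
--         return doi_str.lower()
--     return ''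
-- ===== SOURCE B (Python) =====
-- def extract_doi_key(doi_str: str) -> str:
--     """Extract bare DOI (e.g. '10.1234/foo') from a URL or raw DOI string."""
--     if not doi_str:
--         return ''
--     s = doi_str.strip()
--     low = s.lower()
--     rest = None
--     if low.startswith('https://'):
--         rest = low[8:]
--     elif low.startswith('http://'):
--         rest = low[7:]
--     if rest is not None:
--         if rest.startswith('dx.'):
--             rest = rest[3:]
--         if rest.startswith('doi.org/'):
--             return rest[8:]
--     return low if s.startswith('10.') else ''
-- ===== Notes on version B (the rewrite author's own statement) =====
-- stated objective: alternative
-- what changed: Replaces A's scan over a list of four full URL prefixes by a single scheme-then-host decomposition: strip 'https://'/'http://' once, then an optional 'dx.', then require 'doi.org/', slicing as it goes.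
import Mathlib
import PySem

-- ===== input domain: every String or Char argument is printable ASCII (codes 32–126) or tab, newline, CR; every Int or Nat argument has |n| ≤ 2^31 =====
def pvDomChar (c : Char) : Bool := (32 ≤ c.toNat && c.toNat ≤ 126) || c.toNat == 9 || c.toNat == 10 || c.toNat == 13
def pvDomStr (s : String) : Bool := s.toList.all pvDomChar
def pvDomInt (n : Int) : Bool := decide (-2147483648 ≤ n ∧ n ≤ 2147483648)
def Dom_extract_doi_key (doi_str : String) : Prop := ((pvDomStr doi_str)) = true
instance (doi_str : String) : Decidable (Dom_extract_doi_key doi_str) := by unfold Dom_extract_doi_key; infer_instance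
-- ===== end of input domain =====

-- B replaces A's scan over four full URL prefixes by a scheme-then-host decomposition
-- (strip the http(s):// scheme once, then an optional 'dx.', then require 'doi.org/');
-- objective: alternative structure of the same cost, no speed claim.

-- ===== PORT A =====
def aPrefixes : List String :=
  ["https://doi.org/", "http://doi.org/", "http://dx.doi.org/", "https://dx.doi.org/"]

-- the 'for prefix in [...]' loop of A, with its early returns
def aLoop (s : String) : List String → String
  | [] => if PySem.Str.startswith s "10." then PySem.Str.lower s else ""
  | p :: ps =>
      if PySem.Str.startswith (PySem.Str.lower s) p then
        PySem.Str.lower (PySem.Str.slice s (some (PySem.Str.len p : Int)) none)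
      else aLoop s ps

def extract_doi_key (doi_str : String) : String :=
  if doi_str == "" then "" else aLoop (PySem.Str.strip doi_str) aPrefixes

-- ===== PORT B =====
def extract_doi_key_alt (doi_str : String) : String :=
  if doi_str == "" then ""
  else
    let s := PySem.Str.strip doi_str
    let low := PySem.Str.lower s
    let rest? : Option String :=
      if PySem.Str.startswith low "https://" then some (PySem.Str.slice low (some 8) none)
      else if PySem.Str.startswith low "http://" then some (PySem.Str.slice low (some 7) none)
      else none
    let fallback := if PySem.Str.startswith s "10." then low else ""
    match rest? with
    | some r0 =>
        let r := if PySem.Str.startswith r0 "dx." then PySem.Str.slice r0 (some 3) none else r0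
        if PySem.Str.startswith r "doi.org/" then PySem.Str.slice r (some 8) none else fallback
    | none => fallback

-- ===== PRECONDITION & SPEC =====
def Spec_extract_doi_key (doi_str : String) (out : String) : Prop := out = extract_doi_key_alt doi_str
instance (doi_str : String) (out : String) : Decidable (Spec_extract_doi_key doi_str out) := by unfold Spec_extract_doi_key; infer_instance

-- ===== CLAIM (what is proved, stated in full; the proofs are below) =====
def Claim_equal_extract_doi_key : Prop := ∀ (doi_str : String), Dom_extract_doi_key doi_str → Spec_extract_doi_key doi_str (extract_doi_key doi_str)

-- ===== LEMMAS AND PROOFS =====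

lemma pref_append (p q l : List Char) :
    (p ++ q) <+: l ↔ p <+: l ∧ q <+: l.drop p.length := by
  constructor
  · rintro ⟨t, rfl⟩
    exact ⟨⟨q ++ t, by simp⟩, ⟨t, by simp⟩⟩
  · rintro ⟨⟨t1, rfl⟩, h2⟩
    rw [List.drop_left] at h2
    obtain ⟨t2, rfl⟩ := h2
    exact ⟨t2, by simp⟩
lemma dec2 (p q l : List Char) (n : Nat) (hn : p.length = n) :
    (p ++ q) <+: l ↔ p <+: l ∧ q <+: l.drop n := by rw [pref_append, hn]
lemma sw_iff (a b : String) : PySem.Str.startswith a b = true ↔ b.toList <+: a.toList := by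
  simp [PySem.Chars.startswith_iff]
lemma pref_conflict {p q l : List Char} (hp : p <+: l) (hq : q <+: l)
    (h : ¬ (p <+: q ∨ q <+: p)) : False :=
  h (List.prefix_or_prefix_of_prefix hp hq)
lemma slice_from_toList (x : String) (n : Int) (hn : 0 ≤ n) :
    (PySem.Str.slice x (some n) none).toList = x.toList.drop n.toNat := by
  simp [PySem.Str.slice, PySem.List.slice_from _ hn]
lemma lower_drop (l : List Char) (n : Nat) :
    PySem.Chars.lower (l.drop n) = (PySem.Chars.lower l).drop n := by
  simp [PySem.Chars.lower, List.map_drop]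

lemma core (s : String) :
    aLoop s aPrefixes =
      (let low := PySem.Str.lower s
       let rest? : Option String :=
         if PySem.Str.startswith low "https://" then some (PySem.Str.slice low (some 8) none)
         else if PySem.Str.startswith low "http://" then some (PySem.Str.slice low (some 7) none)
         else none
       let fallback := if PySem.Str.startswith s "10." then low else ""
       match rest? with
       | some r0 =>
           let r := if PySem.Str.startswith r0 "dx." then PySem.Str.slice r0 (some 3) none else r0
           if PySem.Str.startswith r "doi.org/" then PySem.Str.slice r (some 8) none else fallback
       | none => fallback) := by
  simp only [aLoop, aPrefixes]
  by_cases h8 : PySem.Str.startswith (PySem.Str.lower s) "https://" = true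
  · rw [if_pos h8]
    dsimp only
    have p8 := (sw_iff _ _).mp h8
    have hr0 : (PySem.Str.slice (PySem.Str.lower s) (some 8) none).toList
        = (PySem.Str.lower s).toList.drop 8 := by
      rw [slice_from_toList _ _ (by norm_num)]; norm_num [show Int.toNat 8 = 8 from rfl]
    by_cases hdx : PySem.Str.startswith (PySem.Str.slice (PySem.Str.lower s) (some 8) none) "dx." = true
    · rw [if_pos hdx]
      have pdx : "dx.".toList <+: (PySem.Str.lower s).toList.drop 8 := by
        have := (sw_iff _ _).mp hdx; rwa [hr0] at this
      have hC1 : ¬ (PySem.Str.startswith (PySem.Str.lower s) "https://doi.org/" = true) := by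
        intro hc
        have := (sw_iff _ _).mp hc
        rw [show ("https://doi.org/").toList = "https://".toList ++ "doi.org/".toList from by decide,
          dec2 _ _ _ 8 (by decide)] at this
        exact pref_conflict pdx this.2 (by decide)
      have hC2 : ¬ (PySem.Str.startswith (PySem.Str.lower s) "http://doi.org/" = true) := by
        intro hc
        exact pref_conflict p8 ((sw_iff _ _).mp hc) (by decide)
      have hC3 : ¬ (PySem.Str.startswith (PySem.Str.lower s) "http://dx.doi.org/" = true) := by
        intro hc
        exact pref_conflict p8 ((sw_iff _ _).mp hc) (by decide)
      have hr : (PySem.Str.slice (PySem.Str.slice (PySem.Str.lower s) (some 8) none) (some 3) none).toList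
          = ((PySem.Str.lower s).toList.drop 8).drop 3 := by
        rw [slice_from_toList _ _ (by norm_num), hr0]; norm_num [show Int.toNat 3 = 3 from rfl]
      by_cases hdoi : PySem.Str.startswith (PySem.Str.slice (PySem.Str.slice (PySem.Str.lower s) (some 8) none) (some 3) none) "doi.org/" = true
      · have pdoi : "doi.org/".toList <+: ((PySem.Str.lower s).toList.drop 8).drop 3 := by
          have := (sw_iff _ _).mp hdoi; rwa [hr] at this
        have hC4 : PySem.Str.startswith (PySem.Str.lower s) "https://dx.doi.org/" = true := by
          rw [sw_iff,
            show ("https://dx.doi.org/").toList = "https://".toList ++ ("dx.".toList ++ "doi.org/".toList) from by decide,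
            dec2 _ _ _ 8 (by decide), dec2 _ _ _ 3 (by decide)]
          exact ⟨p8, pdx, pdoi⟩
        rw [if_neg hC1, if_neg hC2, if_neg hC3, if_pos hC4, if_pos hdoi]
        apply String.toList_inj.mp
        simp only [PySem.Str.toList_lower]
        rw [show (PySem.Str.len "https://dx.doi.org/" : Int) = 19 from by decide]
        rw [slice_from_toList _ _ (by norm_num), slice_from_toList _ _ (by norm_num),
            slice_from_toList _ _ (by norm_num), slice_from_toList _ _ (by norm_num)]
        rw [lower_drop]
        norm_num [List.drop_drop, show Int.toNat 8 = 8 from rfl, show Int.toNat 3 = 3 from rfl,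
          show Int.toNat 19 = 19 from rfl]
      · have hC4 : ¬ (PySem.Str.startswith (PySem.Str.lower s) "https://dx.doi.org/" = true) := by
          intro hc
          have := (sw_iff _ _).mp hc
          rw [show ("https://dx.doi.org/").toList = "https://".toList ++ ("dx.".toList ++ "doi.org/".toList) from by decide,
            dec2 _ _ _ 8 (by decide), dec2 _ _ _ 3 (by decide)] at this
          exact hdoi ((sw_iff _ _).mpr (by rw [hr]; exact this.2.2))
        rw [if_neg hC1, if_neg hC2, if_neg hC3, if_neg hC4, if_neg hdoi]
    · rw [if_neg hdx]
      have hdx' : ¬ ("dx.".toList <+: (PySem.Str.lower s).toList.drop 8) := by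
        intro hc; exact hdx ((sw_iff _ _).mpr (by rw [hr0]; exact hc))
      have hC2 : ¬ (PySem.Str.startswith (PySem.Str.lower s) "http://doi.org/" = true) := by
        intro hc; exact pref_conflict p8 ((sw_iff _ _).mp hc) (by decide)
      have hC3 : ¬ (PySem.Str.startswith (PySem.Str.lower s) "http://dx.doi.org/" = true) := by
        intro hc; exact pref_conflict p8 ((sw_iff _ _).mp hc) (by decide)
      have hC4 : ¬ (PySem.Str.startswith (PySem.Str.lower s) "https://dx.doi.org/" = true) := by
        intro hc
        have := (sw_iff _ _).mp hc
        rw [show ("https://dx.doi.org/").toList = "https://".toList ++ ("dx.".toList ++ "doi.org/".toList) from by decide,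
          dec2 _ _ _ 8 (by decide), dec2 _ _ _ 3 (by decide)] at this
        exact hdx' this.2.1
      by_cases hdoi : PySem.Str.startswith (PySem.Str.slice (PySem.Str.lower s) (some 8) none) "doi.org/" = true
      · have pdoi : "doi.org/".toList <+: (PySem.Str.lower s).toList.drop 8 := by
          have := (sw_iff _ _).mp hdoi; rwa [hr0] at this
        have hC1 : PySem.Str.startswith (PySem.Str.lower s) "https://doi.org/" = true := by
          rw [sw_iff,
            show ("https://doi.org/").toList = "https://".toList ++ "doi.org/".toList from by decide,
            dec2 _ _ _ 8 (by decide)]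
          exact ⟨p8, pdoi⟩
        rw [if_pos hC1, if_pos hdoi]
        apply String.toList_inj.mp
        simp only [PySem.Str.toList_lower]
        rw [show (PySem.Str.len "https://doi.org/" : Int) = 16 from by decide]
        rw [slice_from_toList _ _ (by norm_num), slice_from_toList _ _ (by norm_num),
            slice_from_toList _ _ (by norm_num)]
        rw [lower_drop]
        norm_num [List.drop_drop, show Int.toNat 8 = 8 from rfl, show Int.toNat 16 = 16 from rfl]
      · have hC1 : ¬ (PySem.Str.startswith (PySem.Str.lower s) "https://doi.org/" = true) := by
          intro hc
          have := (sw_iff _ _).mp hc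
          rw [show ("https://doi.org/").toList = "https://".toList ++ "doi.org/".toList from by decide,
            dec2 _ _ _ 8 (by decide)] at this
          exact hdoi ((sw_iff _ _).mpr (by rw [hr0]; exact this.2))
        rw [if_neg hC1, if_neg hC2, if_neg hC3, if_neg hC4, if_neg hdoi]
  · rw [if_neg h8]
    have h8' : ¬ ("https://".toList <+: (PySem.Str.lower s).toList) := fun hc => h8 ((sw_iff _ _).mpr hc)
    have hC1 : ¬ (PySem.Str.startswith (PySem.Str.lower s) "https://doi.org/" = true) := by
      intro hc
      exact h8' (List.IsPrefix.trans (by decide) ((sw_iff _ _).mp hc))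
    have hC4 : ¬ (PySem.Str.startswith (PySem.Str.lower s) "https://dx.doi.org/" = true) := by
      intro hc
      exact h8' (List.IsPrefix.trans (by decide) ((sw_iff _ _).mp hc))
    by_cases h7 : PySem.Str.startswith (PySem.Str.lower s) "http://" = true
    · rw [if_pos h7]
      dsimp only
      have p7 := (sw_iff _ _).mp h7
      have hr0 : (PySem.Str.slice (PySem.Str.lower s) (some 7) none).toList
          = (PySem.Str.lower s).toList.drop 7 := by
        rw [slice_from_toList _ _ (by norm_num)]; norm_num [show Int.toNat 7 = 7 from rfl]
      by_cases hdx : PySem.Str.startswith (PySem.Str.slice (PySem.Str.lower s) (some 7) none) "dx." = true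
      · rw [if_pos hdx]
        have pdx : "dx.".toList <+: (PySem.Str.lower s).toList.drop 7 := by
          have := (sw_iff _ _).mp hdx; rwa [hr0] at this
        have hC2 : ¬ (PySem.Str.startswith (PySem.Str.lower s) "http://doi.org/" = true) := by
          intro hc
          have := (sw_iff _ _).mp hc
          rw [show ("http://doi.org/").toList = "http://".toList ++ "doi.org/".toList from by decide,
            dec2 _ _ _ 7 (by decide)] at this
          exact pref_conflict pdx this.2 (by decide)
        have hr : (PySem.Str.slice (PySem.Str.slice (PySem.Str.lower s) (some 7) none) (some 3) none).toList
            = ((PySem.Str.lower s).toList.drop 7).drop 3 := by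
          rw [slice_from_toList _ _ (by norm_num), hr0]; norm_num [show Int.toNat 3 = 3 from rfl]
        by_cases hdoi : PySem.Str.startswith (PySem.Str.slice (PySem.Str.slice (PySem.Str.lower s) (some 7) none) (some 3) none) "doi.org/" = true
        · have pdoi : "doi.org/".toList <+: ((PySem.Str.lower s).toList.drop 7).drop 3 := by
            have := (sw_iff _ _).mp hdoi; rwa [hr] at this
          have hC3 : PySem.Str.startswith (PySem.Str.lower s) "http://dx.doi.org/" = true := by
            rw [sw_iff,
              show ("http://dx.doi.org/").toList = "http://".toList ++ ("dx.".toList ++ "doi.org/".toList) from by decide,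
              dec2 _ _ _ 7 (by decide), dec2 _ _ _ 3 (by decide)]
            exact ⟨p7, pdx, pdoi⟩
          rw [if_neg hC1, if_neg hC2, if_pos hC3, if_pos hdoi]
          apply String.toList_inj.mp
          simp only [PySem.Str.toList_lower]
          rw [show (PySem.Str.len "http://dx.doi.org/" : Int) = 18 from by decide]
          rw [slice_from_toList _ _ (by norm_num), slice_from_toList _ _ (by norm_num),
              slice_from_toList _ _ (by norm_num), slice_from_toList _ _ (by norm_num)]
          rw [lower_drop]
          norm_num [List.drop_drop, show Int.toNat 8 = 8 from rfl, show Int.toNat 3 = 3 from rfl,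
            show Int.toNat 7 = 7 from rfl, show Int.toNat 18 = 18 from rfl]
        · have hC3 : ¬ (PySem.Str.startswith (PySem.Str.lower s) "http://dx.doi.org/" = true) := by
            intro hc
            have := (sw_iff _ _).mp hc
            rw [show ("http://dx.doi.org/").toList = "http://".toList ++ ("dx.".toList ++ "doi.org/".toList) from by decide,
              dec2 _ _ _ 7 (by decide), dec2 _ _ _ 3 (by decide)] at this
            exact hdoi ((sw_iff _ _).mpr (by rw [hr]; exact this.2.2))
          rw [if_neg hC1, if_neg hC2, if_neg hC3, if_neg hC4, if_neg hdoi]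
      · rw [if_neg hdx]
        have hdx' : ¬ ("dx.".toList <+: (PySem.Str.lower s).toList.drop 7) := by
          intro hc; exact hdx ((sw_iff _ _).mpr (by rw [hr0]; exact hc))
        have hC3 : ¬ (PySem.Str.startswith (PySem.Str.lower s) "http://dx.doi.org/" = true) := by
          intro hc
          have := (sw_iff _ _).mp hc
          rw [show ("http://dx.doi.org/").toList = "http://".toList ++ ("dx.".toList ++ "doi.org/".toList) from by decide,
            dec2 _ _ _ 7 (by decide), dec2 _ _ _ 3 (by decide)] at this
          exact hdx' this.2.1
        by_cases hdoi : PySem.Str.startswith (PySem.Str.slice (PySem.Str.lower s) (some 7) none) "doi.org/" = true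
        · have pdoi : "doi.org/".toList <+: (PySem.Str.lower s).toList.drop 7 := by
            have := (sw_iff _ _).mp hdoi; rwa [hr0] at this
          have hC2 : PySem.Str.startswith (PySem.Str.lower s) "http://doi.org/" = true := by
            rw [sw_iff,
              show ("http://doi.org/").toList = "http://".toList ++ "doi.org/".toList from by decide,
              dec2 _ _ _ 7 (by decide)]
            exact ⟨p7, pdoi⟩
          rw [if_neg hC1, if_pos hC2, if_pos hdoi]
          apply String.toList_inj.mp
          simp only [PySem.Str.toList_lower]
          rw [show (PySem.Str.len "http://doi.org/" : Int) = 15 from by decide]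
          rw [slice_from_toList _ _ (by norm_num), slice_from_toList _ _ (by norm_num),
              slice_from_toList _ _ (by norm_num)]
          rw [lower_drop]
          norm_num [List.drop_drop, show Int.toNat 8 = 8 from rfl, show Int.toNat 7 = 7 from rfl,
            show Int.toNat 15 = 15 from rfl]
        · have hC2 : ¬ (PySem.Str.startswith (PySem.Str.lower s) "http://doi.org/" = true) := by
            intro hc
            have := (sw_iff _ _).mp hc
            rw [show ("http://doi.org/").toList = "http://".toList ++ "doi.org/".toList from by decide,
              dec2 _ _ _ 7 (by decide)] at this
            exact hdoi ((sw_iff _ _).mpr (by rw [hr0]; exact this.2))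
          rw [if_neg hC1, if_neg hC2, if_neg hC3, if_neg hC4, if_neg hdoi]
    · rw [if_neg h7]
      dsimp only
      have h7' : ¬ ("http://".toList <+: (PySem.Str.lower s).toList) := fun hc => h7 ((sw_iff _ _).mpr hc)
      have hC2 : ¬ (PySem.Str.startswith (PySem.Str.lower s) "http://doi.org/" = true) := by
        intro hc
        exact h7' (List.IsPrefix.trans (by decide) ((sw_iff _ _).mp hc))
      have hC3 : ¬ (PySem.Str.startswith (PySem.Str.lower s) "http://dx.doi.org/" = true) := by
        intro hc
        exact h7' (List.IsPrefix.trans (by decide) ((sw_iff _ _).mp hc))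
      rw [if_neg hC1, if_neg hC2, if_neg hC3, if_neg hC4]

-- ===== VERDICT (by name: the statement is the Claim_ definition above) =====
theorem extract_doi_key_spec : Claim_equal_extract_doi_key := by
  intro doi_str _
  unfold Spec_extract_doi_key extract_doi_key extract_doi_key_alt
  by_cases h : doi_str = ""
  · subst h; rfl
  · have hb : ¬ ((doi_str == "") = true) := by simpa using h
    rw [if_neg hb, if_neg hb]
    exact core (PySem.Str.strip doi_str)
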